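-- pv_equiv track=rewrite | github.com/Goshective/Algorithms-and-Data-Structures | Lab2/Task_plus_8/src/task8.py | sum_polynoms
-- ===== SOURCE A (Python) =====
-- def sum_polynoms(A, B, shift_A=0, shift_B=0):
--     len_r = max(len(A) + shift_A, len(B) + shift_B)
--     R = [0] * len_r
--     i = min(shift_A, shift_B)
--     while i < len_r:
--         if 0 <= i-shift_A < len(A):
--             R[i] += A[i - shift_A]
--         if 0 <= i-shift_B < len(B):
--             R[i] += B[i - shift_B]
--         i += 1
--     return R
-- ===== SOURCE B (Python) =====
-- def sum_polynoms(A, B, shift_A=0, shift_B=0):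
--     len_r = max(len(A) + shift_A, len(B) + shift_B)
--     R = [0] * len_r
--     for j in range(len(A)):
--         R[j + shift_A] += A[j]
--     for j in range(len(B)):
--         R[j + shift_B] += B[j]
--     return R
-- ===== Notes on version B (the rewrite author's own statement) =====
-- stated objective: simpler
-- what changed: Replaces A's single gather loop over every output index with two per-index bounds checks by two unguarded scatter loops, one over each input array, accumulating into the preallocated result.
import Mathlib
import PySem

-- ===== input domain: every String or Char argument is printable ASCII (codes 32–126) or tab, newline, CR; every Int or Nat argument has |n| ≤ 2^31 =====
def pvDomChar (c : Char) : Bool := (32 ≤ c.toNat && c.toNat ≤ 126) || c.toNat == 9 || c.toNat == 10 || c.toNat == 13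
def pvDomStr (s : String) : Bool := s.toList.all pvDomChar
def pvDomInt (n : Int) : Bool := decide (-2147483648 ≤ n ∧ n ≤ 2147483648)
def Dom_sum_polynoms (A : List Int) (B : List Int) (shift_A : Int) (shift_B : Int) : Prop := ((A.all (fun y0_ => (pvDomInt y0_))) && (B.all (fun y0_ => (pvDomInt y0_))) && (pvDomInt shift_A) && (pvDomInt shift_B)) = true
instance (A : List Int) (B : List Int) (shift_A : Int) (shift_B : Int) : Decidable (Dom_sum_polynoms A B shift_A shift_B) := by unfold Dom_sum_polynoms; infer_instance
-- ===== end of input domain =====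

-- B replaces A's single gather loop over output indices (with per-index bounds checks) by two
-- unguarded scatter loops over the two input arrays; objective: simpler.

-- ===== PORT A =====
def sum_polynoms (A : List Int) (B : List Int) (shift_A : Int) (shift_B : Int) : List Int :=
  let len_r : Int := max ((A.length : Int) + shift_A) ((B.length : Int) + shift_B)
  let R : List Int := List.replicate len_r.toNat 0
  (PySem.List.pyRange (min shift_A shift_B) len_r 1).foldl
    (fun R i =>
      let R := if 0 ≤ i - shift_A ∧ i - shift_A < (A.length : Int)
               then PySem.List.pySetD R i (PySem.List.pyGetD R i 0 + PySem.List.pyGetD A (i - shift_A) 0)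
               else R
      if 0 ≤ i - shift_B ∧ i - shift_B < (B.length : Int)
               then PySem.List.pySetD R i (PySem.List.pyGetD R i 0 + PySem.List.pyGetD B (i - shift_B) 0)
               else R) R

-- ===== PORT B =====
-- helper = Source B's scatter loop 'for j in range(len(C)): R[j + shift] += C[j]'
def pvScatter (R : List Int) (C : List Int) (shift : Int) : List Int :=
  (PySem.List.pyRange 0 (C.length : Int) 1).foldl
    (fun R j => PySem.List.pySetD R (j + shift) (PySem.List.pyGetD R (j + shift) 0 + PySem.List.pyGetD C j 0)) R

def sum_polynoms_alt (A : List Int) (B : List Int) (shift_A : Int) (shift_B : Int) : List Int :=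
  let len_r : Int := max ((A.length : Int) + shift_A) ((B.length : Int) + shift_B)
  let R : List Int := List.replicate len_r.toNat 0
  pvScatter (pvScatter R A shift_A) B shift_B

-- ===== PRECONDITION & SPEC =====
-- Pre_ excludes exactly the inputs on which the Python A raises IndexError: a write R[j+shift]
-- whose (negative) index falls below -len_r.  (B raises there too.)
def Pre_sum_polynoms (A : List Int) (B : List Int) (shift_A : Int) (shift_B : Int) : Prop :=
  (A = [] ∨ -(max ((A.length : Int) + shift_A) ((B.length : Int) + shift_B)) ≤ shift_A) ∧
  (B = [] ∨ -(max ((A.length : Int) + shift_A) ((B.length : Int) + shift_B)) ≤ shift_B)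
instance (A : List Int) (B : List Int) (shift_A : Int) (shift_B : Int) : Decidable (Pre_sum_polynoms A B shift_A shift_B) := by unfold Pre_sum_polynoms; infer_instance
def pvWitness_sum_polynoms : List Int × List Int × Int × Int := ([1, 2], [3], 1, 0)

def Spec_sum_polynoms (A : List Int) (B : List Int) (shift_A : Int) (shift_B : Int) (out : List Int) : Prop := out = sum_polynoms_alt A B shift_A shift_B
instance (A : List Int) (B : List Int) (shift_A : Int) (shift_B : Int) (out : List Int) : Decidable (Spec_sum_polynoms A B shift_A shift_B out) := by unfold Spec_sum_polynoms; infer_instance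

-- ===== CLAIM (what is proved, stated in full; the proofs are below) =====
def Claim_equal_sum_polynoms : Prop := ∀ (A : List Int) (B : List Int) (shift_A : Int) (shift_B : Int), Dom_sum_polynoms A B shift_A shift_B → Pre_sum_polynoms A B shift_A shift_B → Spec_sum_polynoms A B shift_A shift_B (sum_polynoms A B shift_A shift_B)

-- ===== LEMMAS AND PROOFS =====

def pvUpd (i x : Int) (R : List Int) : List Int :=
  PySem.List.pySetD R i (PySem.List.pyGetD R i 0 + x)

lemma pvUpd_of_none {i : Int} {R : List Int} (h : PySem.List.pyIdx? R.length i = none)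
    (x : Int) : pvUpd i x R = R := by
  simp [pvUpd, PySem.List.pySetD, PySem.List.pySet?, h]

lemma pvIdx_lt {n : Nat} {i : Int} {p : Nat} (h : PySem.List.pyIdx? n i = some p) : p < n := by
  simp only [PySem.List.pyIdx?] at h
  split_ifs at h <;> simp_all <;> omega

lemma pvUpd_of_some {i : Int} {R : List Int} {p : Nat}
    (h : PySem.List.pyIdx? R.length i = some p) (x : Int) :
    pvUpd i x R = R.set p (R.getD p 0 + x) := by
  have hp : p < R.length := pvIdx_lt h
  simp [pvUpd, PySem.List.pySetD, PySem.List.pySet?, PySem.List.pyGetD, PySem.List.pyGet?, h,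
        List.getD_eq_getElem?_getD, List.getElem?_eq_getElem hp]

lemma pvUpd_set {i : Int} {R : List Int} {p : Nat} (q : Nat) (v x : Int)
    (h : PySem.List.pyIdx? R.length i = some p) :
    pvUpd i x (R.set q v) = (R.set q v).set p ((R.set q v).getD p 0 + x) :=
  pvUpd_of_some (by simpa using h) x

lemma pvUpd_set_none {i : Int} {R : List Int} (q : Nat) (v x : Int)
    (h : PySem.List.pyIdx? R.length i = none) :
    pvUpd i x (R.set q v) = R.set q v :=
  pvUpd_of_none (by simpa using h) x

lemma pvUpd_comm (i j x y : Int) (R : List Int) :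
    pvUpd i x (pvUpd j y R) = pvUpd j y (pvUpd i x R) := by
  cases hi : PySem.List.pyIdx? R.length i with
  | none =>
    rw [pvUpd_of_none hi x]
    cases hj : PySem.List.pyIdx? R.length j with
    | none => rw [pvUpd_of_none hj y, pvUpd_of_none hi x]
    | some q => rw [pvUpd_of_some hj y, pvUpd_set_none q _ x hi]
  | some p =>
    cases hj : PySem.List.pyIdx? R.length j with
    | none => rw [pvUpd_of_none hj y, pvUpd_of_some hi x, pvUpd_set_none p _ y hj]
    | some q =>
      have hp : p < R.length := pvIdx_lt hi
      have hq : q < R.length := pvIdx_lt hj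
      rw [pvUpd_of_some hj y, pvUpd_of_some hi x, pvUpd_set q _ x hi, pvUpd_set p _ y hj]
      by_cases hpq : p = q
      · subst hpq
        rw [List.set_set, List.set_set]
        have h1 : ∀ w : Int, (R.set p w).getD p 0 = w := fun w => by
          simp [List.getD_eq_getElem?_getD, List.getElem?_set_self hp]
        rw [h1, h1]
        congr 1
        ring
      · have h2 : (R.set q (R.getD q 0 + y)).getD p 0 = R.getD p 0 := by
          simp [List.getD_eq_getElem?_getD, List.getElem?_set_ne (by omega : q ≠ p)]
        have h3 : (R.set p (R.getD p 0 + x)).getD q 0 = R.getD q 0 := by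
          simp [List.getD_eq_getElem?_getD, List.getElem?_set_ne (by omega : p ≠ q)]
        rw [h2, h3, List.set_comm _ _ (by omega : q ≠ p)]

lemma pvRange_one (a b : Int) :
    PySem.List.pyRange a b 1 = (List.range (b - a).toNat).map (fun (k : Nat) => a + (k : Int)) := by
  simp only [PySem.List.pyRange, if_neg one_ne_zero, if_pos Int.zero_lt_one, one_mul]
  split_ifs with h
  · norm_num
  · simp [(by omega : (b - a).toNat = 0)]


lemma pvFoldl_pull {α ι : Type} (f : ι → α → α) (h : α → α)
    (hc : ∀ i R, h (f i R) = f i (h R)) :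
    ∀ (l : List ι) (R : α), h (l.foldl (fun R i => f i R) R) = l.foldl (fun R i => f i R) (h R) := by
  intro l
  induction l with
  | nil => intro R; rfl
  | cons a l ih => intro R; simp only [List.foldl_cons, ih, hc]

lemma pvFoldl_interchange {α ι : Type} (f g : ι → α → α)
    (hc : ∀ i j R, g j (f i R) = f i (g j R)) :
    ∀ (l : List ι) (R : α),
      l.foldl (fun R i => g i (f i R)) R = l.foldl (fun R i => g i R) (l.foldl (fun R i => f i R) R) := by
  intro l
  induction l with
  | nil => intro R; rfl
  | cons a l ih =>
    intro R
    simp only [List.foldl_cons, ih]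
    rw [pvFoldl_pull f (g a) (fun i R => hc i a R)]

lemma pvFoldl_guard_id (u : Int → List Int → List Int) (a b m : Int)
    (N : Nat) (hab : a = b) :
    ∀ (R : List Int),
      (List.range N).foldl (fun (R : List Int) (k : Nat) => if a ≤ m + (k : Int) ∧ m + (k : Int) < b then u (m + (k : Int)) R else R) R = R := by
  induction N with
  | zero => intro R; rfl
  | succ n ih =>
    intro R
    rw [List.range_succ, List.foldl_append, ih]
    simp only [List.foldl_cons, List.foldl_nil]
    rw [if_neg (by omega)]

lemma pvFoldl_guard (u : Int → List Int → List Int) :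
    ∀ (N : Nat) (m a b : Int) (R : List Int), m ≤ a → a ≤ b → b ≤ m + N →
      (List.range N).foldl (fun (R : List Int) (k : Nat) => if a ≤ m + (k : Int) ∧ m + (k : Int) < b then u (m + (k : Int)) R else R) R
      = (List.range (b - a).toNat).foldl (fun (R : List Int) (k : Nat) => u (a + (k : Int)) R) R := by
  intro N
  induction N with
  | zero =>
    intro m a b R hma hab hbm
    have h : (b - a).toNat = 0 := by omega
    rw [h]
    rfl
  | succ n ih =>
    intro m a b R hma hab hbm
    by_cases heq : a = b
    · rw [pvFoldl_guard_id u a b m _ heq]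
      rw [(by omega : (b - a).toNat = 0)]
      rfl
    · have hab' : a < b := lt_of_le_of_ne hab heq
      rw [List.range_succ, List.foldl_append]
      by_cases hb : b ≤ m + n
      · rw [ih m a b R hma hab hb]
        simp only [List.foldl_cons, List.foldl_nil]
        rw [if_neg (by omega)]
      · simp only [List.foldl_cons, List.foldl_nil]
        rw [if_pos (by constructor <;> [omega; omega])]
        rw [PySem.List.foldl_congr_mem (List.range n) _
              (fun (R : List Int) (k : Nat) => if a ≤ m + (k : Int) ∧ m + (k : Int) < b - 1 then u (m + (k : Int)) R else R) R
              (by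
                intro acc k hk
                rw [List.mem_range] at hk
                beta_reduce
                by_cases hg : a ≤ m + (k : Int)
                · rw [if_pos ⟨hg, by omega⟩, if_pos ⟨hg, by omega⟩]
                · rw [if_neg (by omega), if_neg (by omega)])]
        rw [ih m a (b - 1) R hma (by omega) (by omega)]
        rw [(by omega : (b - a).toNat = (b - 1 - a).toNat + 1), List.range_succ, List.foldl_append]
        simp only [List.foldl_cons, List.foldl_nil]
        congr 1
        omega

lemma pvScatter_eq (R C : List Int) (s : Int) :
    pvScatter R C s
      = (List.range C.length).foldl
          (fun (R : List Int) (k : Nat) => pvUpd (s + (k : Int)) (PySem.List.pyGetD C ((k : Int)) 0) R) R := by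
  rw [pvScatter, pvRange_one, List.foldl_map]
  rw [(by omega : ((C.length : Int) - 0).toNat = C.length)]
  apply PySem.List.foldl_congr_mem
  intro acc k _
  beta_reduce
  simp only [pvUpd, zero_add]
  rw [Int.add_comm (k : Int) s]

lemma pvGather_eq (C : List Int) (s m L : Int) (hm : m ≤ s) (hL : s + (C.length : Int) ≤ L)
    (R : List Int) :
    (PySem.List.pyRange m L 1).foldl
      (fun (R : List Int) (i : Int) =>
        if s ≤ i ∧ i < s + (C.length : Int) then pvUpd i (PySem.List.pyGetD C (i - s) 0) R else R) R
    = pvScatter R C s := by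
  rw [pvRange_one, List.foldl_map]
  have hg := pvFoldl_guard (fun i R => pvUpd i (PySem.List.pyGetD C (i - s) 0) R)
      (L - m).toNat m s (s + (C.length : Int)) R hm (by omega) (by omega)
  beta_reduce at hg
  rw [hg, pvScatter_eq]
  rw [(by omega : (s + (C.length : Int) - s).toNat = C.length)]
  apply PySem.List.foldl_congr_mem
  intro acc k _
  beta_reduce
  congr 2
  omega

lemma pv_main (A B : List Int) (sA sB : Int) :
    sum_polynoms A B sA sB = sum_polynoms_alt A B sA sB := by
  simp only [sum_polynoms, sum_polynoms_alt]
  have hstep :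
      (fun (R : List Int) (i : Int) =>
        let R := if 0 ≤ i - sA ∧ i - sA < (A.length : Int)
                 then PySem.List.pySetD R i (PySem.List.pyGetD R i 0 + PySem.List.pyGetD A (i - sA) 0)
                 else R
        if 0 ≤ i - sB ∧ i - sB < (B.length : Int)
                 then PySem.List.pySetD R i (PySem.List.pyGetD R i 0 + PySem.List.pyGetD B (i - sB) 0)
                 else R)
      = (fun (R : List Int) (i : Int) =>
          (fun (i : Int) (R : List Int) =>
            if sB ≤ i ∧ i < sB + (B.length : Int) then pvUpd i (PySem.List.pyGetD B (i - sB) 0) R else R) i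
          ((fun (i : Int) (R : List Int) =>
            if sA ≤ i ∧ i < sA + (A.length : Int) then pvUpd i (PySem.List.pyGetD A (i - sA) 0) R else R) i R)) := by
    funext R i
    have e1 : (0 ≤ i - sA ∧ i - sA < (A.length : Int)) = (sA ≤ i ∧ i < sA + (A.length : Int)) :=
      propext (by omega)
    have e2 : (0 ≤ i - sB ∧ i - sB < (B.length : Int)) = (sB ≤ i ∧ i < sB + (B.length : Int)) :=
      propext (by omega)
    simp only [pvUpd, e1, e2]
  rw [hstep]
  rw [pvFoldl_interchange
        (fun (i : Int) (R : List Int) =>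
          if sA ≤ i ∧ i < sA + (A.length : Int) then pvUpd i (PySem.List.pyGetD A (i - sA) 0) R else R)
        (fun (i : Int) (R : List Int) =>
          if sB ≤ i ∧ i < sB + (B.length : Int) then pvUpd i (PySem.List.pyGetD B (i - sB) 0) R else R)
        (by
          intro i j R
          dsimp only
          split_ifs <;> try rfl
          apply pvUpd_comm)]
  rw [pvGather_eq A sA (min sA sB) (max ((A.length : Int) + sA) ((B.length : Int) + sB))
        (by omega) (by omega)]
  rw [pvGather_eq B sB (min sA sB) (max ((A.length : Int) + sA) ((B.length : Int) + sB))
        (by omega) (by omega)]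

-- ===== VERDICT (by name: the statement is the Claim_ definition above) =====
theorem sum_polynoms_spec : Claim_equal_sum_polynoms := by
  intro A B sA sB _ _
  unfold Spec_sum_polynoms
  exact pv_main A B sA sB
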